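-- pv_equiv track=rewrite | github.com/aratrikghosh2011-tech/numclassify | numclassify.py | is_sum_of_consecutive_primes
-- ===== SOURCE A (Python) =====
-- def _prime_sieve(limit):
--     if limit < 2: return []
--     sieve = bytearray([1]) * (limit + 1)
--     sieve[0] = sieve[1] = 0
--     for i in range(2, int(limit**0.5) + 1):
--         if sieve[i]:
--             sieve[i*i::i] = bytearray(len(sieve[i*i::i]))
--     return [i for i, v in enumerate(sieve) if v]
--
-- def is_sum_of_consecutive_primes(n):
--     primes = _prime_sieve(n+1)
--     for start in range(len(primes)):
--         s = 0
--         for i in range(start, len(primes)):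
--             s += primes[i]
--             if s == n: return True
--             if s > n: break
--     return False
-- ===== SOURCE B (Python) =====
-- def _prime_sieve(limit):
--     if limit < 2: return []
--     sieve = bytearray([1]) * (limit + 1)
--     sieve[0] = sieve[1] = 0
--     for i in range(2, int(limit**0.5) + 1):
--         if sieve[i]:
--             sieve[i*i::i] = bytearray(len(sieve[i*i::i]))
--     return [i for i, v in enumerate(sieve) if v]
--
-- def is_sum_of_consecutive_primes(n):
--     # One pass over the primes with running prefix sums and a hash set:
--     # a window of consecutive primes sums to n iff some prefix sum q_j
--     # has q_j - n among the earlier prefix sums.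
--     seen = {0}
--     q = 0
--     for p in _prime_sieve(n + 1):
--         q += p
--         if q - n in seen:
--             return True
--         seen.add(q)
--     return False
-- ===== Notes on version B (the rewrite author's own statement) =====
-- stated objective: faster
-- what changed: A scans every window start position with a fresh inner accumulation (quadratic in the number of primes); B makes one pass over the primes keeping a running prefix sum and a hash set of earlier prefix sums, reporting True when q - n is in the set.
import Mathlib
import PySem

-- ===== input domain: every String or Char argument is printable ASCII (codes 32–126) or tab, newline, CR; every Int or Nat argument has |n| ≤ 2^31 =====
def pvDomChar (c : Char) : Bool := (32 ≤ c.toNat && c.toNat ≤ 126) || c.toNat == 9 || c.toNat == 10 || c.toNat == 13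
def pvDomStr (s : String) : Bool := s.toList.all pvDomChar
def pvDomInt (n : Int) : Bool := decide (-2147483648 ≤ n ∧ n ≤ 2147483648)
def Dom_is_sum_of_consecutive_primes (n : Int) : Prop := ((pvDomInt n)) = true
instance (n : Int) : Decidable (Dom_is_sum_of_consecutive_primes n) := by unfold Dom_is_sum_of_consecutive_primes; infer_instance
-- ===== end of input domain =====

-- B replaces A's scan over all window start positions by one pass over prefix sums with a
-- hash set: a window of consecutive primes sums to n iff some prefix sum q_j has q_j - n
-- among the earlier prefix sums (objective: faster window search past the shared sieve).

-- ===== PORT A =====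
-- shared helper: port of _prime_sieve (the identical helper appears in Source A and Source B).
-- The bytearray is an Array Bool (in-place updates, so the interpreter can evaluate it);
-- `int(limit**0.5)` is Nat.sqrt, exact for 0 ≤ limit ≤ 2^31+1 (the float sqrt of such a
-- limit cannot truncate differently); the slice assignment `sieve[i*i::i] = zeros` marks
-- exactly the indices range(i*i, limit+1, i).
def pvMarkFalse (a : Array Bool) (idxs : List Nat) : Array Bool :=
  idxs.foldl (fun a k => a.setIfInBounds k false) a

-- the marking loop: `for i in range(2, int(limit**0.5)+1): if sieve[i]: sieve[i*i::i] = zeros`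
def pvSieveArr (L : Nat) : Array Bool :=
  (List.range' 2 (Nat.sqrt L - 1)).foldl
    (fun a i => if a.getD i false then pvMarkFalse a (List.range' (i*i) ((L - i*i)/i + 1) i) else a)
    (((Array.replicate (L+1) true).setIfInBounds 0 false).setIfInBounds 1 false)

def pvPrimeSieve (limit : Int) : List Int :=
  if limit < 2 then []
  else
    let s := pvSieveArr limit.toNat
    ((List.range (limit.toNat+1)).filter (fun i => s.getD i false)).map (fun (i : Nat) => (i : Int))

-- inner loop of A: `s += primes[i]; if s == n: return True; if s > n: break`
def pvInnerA (n : Int) : List Int → Int → Bool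
  | [], _ => false
  | p :: rest, s =>
    if s + p = n then true
    else if s + p > n then false
    else pvInnerA n rest (s + p)

-- outer loop of A over start positions = over the suffixes of the prime list
def pvOuterA (n : Int) : List Int → Bool
  | [] => false
  | p :: rest => pvInnerA n (p :: rest) 0 || pvOuterA n rest

def is_sum_of_consecutive_primes (n : Int) : Bool :=
  pvOuterA n (pvPrimeSieve (n + 1))

-- ===== PORT B =====
-- B's single pass: running prefix sum q, set `seen` of the earlier prefix sums (seeded with 0).
def pvLoopB (n : Int) : List Int → Int → PySem.Set Int → Bool
  | [], _, _ => false
  | p :: rest, q, seen =>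
    if (q + p - n) ∈ seen then true
    else pvLoopB n rest (q + p) (PySem.Set.add seen (q + p))

def is_sum_of_consecutive_primes_alt (n : Int) : Bool :=
  pvLoopB n (pvPrimeSieve (n + 1)) 0 (PySem.Set.ofList [0])

-- ===== PRECONDITION & SPEC =====
def Spec_is_sum_of_consecutive_primes (n : Int) (out : Bool) : Prop := out = is_sum_of_consecutive_primes_alt n
instance (n : Int) (out : Bool) : Decidable (Spec_is_sum_of_consecutive_primes n out) := by unfold Spec_is_sum_of_consecutive_primes; infer_instance

-- ===== CLAIM (what is proved, stated in full; the proofs are below) =====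
def Claim_equal_is_sum_of_consecutive_primes : Prop := ∀ (n : Int), Dom_is_sum_of_consecutive_primes n → Spec_is_sum_of_consecutive_primes n (is_sum_of_consecutive_primes n)

-- ===== LEMMAS AND PROOFS =====

-- indices 0 and 1 of the sieve stay false (marking only ever writes false), so every
-- element of pvPrimeSieve is positive — needed to justify A's `break`
lemma pvGetD_set_false (a : Array Bool) (k j : Nat) (h : a.getD j false = false) :
    (a.setIfInBounds k false).getD j false = false := by
  simp only [Array.getD_eq_getD_getElem?, Array.getElem?_setIfInBounds] at h ⊢
  split
  · rename_i hkj
    split <;> simp_all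
  · exact h

lemma pvMarkFalse_getD_false (idxs : List Nat) (a : Array Bool) (j : Nat)
    (h : a.getD j false = false) : (pvMarkFalse a idxs).getD j false = false := by
  induction idxs generalizing a with
  | nil => simpa [pvMarkFalse] using h
  | cons k ks ih =>
    simp only [pvMarkFalse, List.foldl_cons] at *
    exact ih _ (pvGetD_set_false a k j h)

lemma pvSieveArr_getD_zero (L : Nat) : (pvSieveArr L).getD 0 false = false := by
  unfold pvSieveArr
  have h0 : (((Array.replicate (L+1) true).setIfInBounds 0 false).setIfInBounds 1 false).getD 0 false = false := by
    apply pvGetD_set_false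
    simp [Array.getD_eq_getD_getElem?]
  generalize (((Array.replicate (L+1) true).setIfInBounds 0 false).setIfInBounds 1 false) = a at h0 ⊢
  generalize List.range' 2 (Nat.sqrt L - 1) = l
  induction l generalizing a with
  | nil => exact h0
  | cons k ks ih =>
    simp only [List.foldl_cons]
    apply ih
    split
    · exact pvMarkFalse_getD_false _ _ _ h0
    · exact h0

lemma pvSieve_pos (m : Int) : ∀ x ∈ pvPrimeSieve m, 0 < x := by
  intro x hx
  unfold pvPrimeSieve at hx
  split at hx
  · simp at hx
  · rcases List.mem_map.mp hx with ⟨i, hi, hxi⟩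
    rcases List.mem_filter.mp hi with ⟨hir, hget⟩
    subst hxi
    by_contra hle
    have : i = 0 := by omega
    subst this
    rw [pvSieveArr_getD_zero] at hget
    simp at hget

lemma pvList_sum_nonneg (l : List Int) (h : ∀ x ∈ l, 0 < x) : 0 ≤ l.sum := by
  induction l with
  | nil => simp
  | cons p r ih =>
    have := h p (by simp)
    have := ih (fun x hx => h x (by simp [hx]))
    simp; omega

lemma pvInnerA_iff (n : Int) (L : List Int) (s : Int) (hpos : ∀ x ∈ L, 0 < x) :
    pvInnerA n L s = true ↔ ∃ w, w <+: L ∧ w ≠ [] ∧ s + w.sum = n := by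
  induction L generalizing s with
  | nil => simp [pvInnerA]
  | cons p rest ih =>
    have hp := hpos p (by simp)
    have hrest : ∀ x ∈ rest, 0 < x := fun x hx => hpos x (by simp [hx])
    simp only [pvInnerA]
    split
    · rename_i heq
      refine iff_of_true rfl ⟨[p], ⟨rest, rfl⟩, by simp, by simpa using heq⟩
    · rename_i hne
      split
      · rename_i hgt
        refine iff_of_false (by simp) ?_
        rintro ⟨w, hw, hwne, hsum⟩
        cases w with
        | nil => exact hwne rfl
        | cons y w' =>
          rcases List.cons_prefix_cons.mp hw with ⟨rfl, hw'⟩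
          have h0 : 0 ≤ w'.sum :=
            pvList_sum_nonneg w' (fun x hx => hrest x (hw'.subset hx))
          simp at hsum
          omega
      · rename_i hgt
        rw [ih (s + p) hrest]
        constructor
        · rintro ⟨w', hw', hwne', hsum'⟩
          exact ⟨p :: w', List.cons_prefix_cons.mpr ⟨rfl, hw'⟩, by simp, by simp; omega⟩
        · rintro ⟨w, hw, hwne, hsum⟩
          cases w with
          | nil => exact absurd rfl hwne
          | cons y w' =>
            rcases List.cons_prefix_cons.mp hw with ⟨rfl, hw'⟩
            cases w' with
            | nil => simp at hsum; omega
            | cons z w'' =>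
              exact ⟨z :: w'', hw', by simp, by simp at hsum ⊢; omega⟩

lemma pvOuterA_iff (n : Int) (L : List Int) (hpos : ∀ x ∈ L, 0 < x) :
    pvOuterA n L = true ↔ ∃ a w b, L = a ++ w ++ b ∧ w ≠ [] ∧ w.sum = n := by
  induction L with
  | nil =>
    simp only [pvOuterA]
    refine iff_of_false (by simp) ?_
    rintro ⟨a, w, b, hL, hw, -⟩
    have := List.append_eq_nil_iff.mp (List.append_eq_nil_iff.mp hL.symm).1
    exact hw this.2
  | cons p rest ih =>
    have hrest : ∀ x ∈ rest, 0 < x := fun x hx => hpos x (by simp [hx])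
    simp only [pvOuterA, Bool.or_eq_true, ih hrest,
      pvInnerA_iff n (p :: rest) 0 hpos]
    constructor
    · rintro (⟨w, ⟨b, hb⟩, hw, hsum⟩ | ⟨a, w, b, hL, hw, hsum⟩)
      · exact ⟨[], w, b, by simpa using hb.symm, hw, by simpa using hsum⟩
      · exact ⟨p :: a, w, b, by simp [hL], hw, hsum⟩
    · rintro ⟨a, w, b, hL, hw, hsum⟩
      cases a with
      | nil =>
        exact Or.inl ⟨w, ⟨b, by simpa using hL.symm⟩, hw, by simpa using hsum⟩
      | cons y a' =>
        simp at hL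
        exact Or.inr ⟨a', w, b, by simp [hL.2], hw, hsum⟩

lemma pvLoopB_iff (n : Int) (L : List Int) (q : Int) (seen : PySem.Set Int) :
    pvLoopB n L q seen = true ↔
      (∃ w, w <+: L ∧ w ≠ [] ∧ (q + w.sum - n) ∈ seen) ∨
      (∃ a w b, L = a ++ w ++ b ∧ a ≠ [] ∧ w ≠ [] ∧ w.sum = n) := by
  induction L generalizing q seen with
  | nil =>
    simp only [pvLoopB]
    refine iff_of_false (by simp) ?_
    rintro (⟨w, hw, hwne, -⟩ | ⟨a, w, b, hL, -, hw, -⟩)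
    · exact hwne (List.prefix_nil.mp hw)
    · have := List.append_eq_nil_iff.mp (List.append_eq_nil_iff.mp hL.symm).1
      exact hw this.2
  | cons p rest ih =>
    simp only [pvLoopB]
    split
    · rename_i hmem
      refine iff_of_true rfl (Or.inl ⟨[p], ⟨rest, rfl⟩, by simp, by simpa using hmem⟩)
    · rename_i hmem
      rw [ih]
      constructor
      · rintro (⟨w', hw', hwne', hm⟩ | ⟨a', w', b', hL', hane', hwne', hsum'⟩)
        · rw [PySem.Set.mem_add] at hm
          rcases hm with hm | hm
          · refine Or.inl ⟨p :: w', List.cons_prefix_cons.mpr ⟨rfl, hw'⟩, by simp, ?_⟩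
            rw [List.sum_cons]
            convert hm using 2
            ring
          · obtain ⟨b, hb⟩ := hw'
            exact Or.inr ⟨[p], w', b, by simp [← hb], by simp, hwne', by omega⟩
        · exact Or.inr ⟨p :: a', w', b', by simp [hL'], by simp, hwne', hsum'⟩
      · rintro (⟨w, hw, hwne, hm⟩ | ⟨a, w, b, hL, hane, hwne, hsum⟩)
        · cases w with
          | nil => exact absurd rfl hwne
          | cons y w' =>
            rcases List.cons_prefix_cons.mp hw with ⟨rfl, hw'⟩
            cases w' with
            | nil =>
              exfalso
              apply hmem
              simpa using hm
            | cons z w'' =>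
              refine Or.inl ⟨z :: w'', hw', by simp, ?_⟩
              rw [PySem.Set.mem_add]
              left
              simp at hm ⊢
              convert hm using 2
              ring
        · cases a with
          | nil => exact absurd rfl hane
          | cons y a' =>
            simp at hL
            obtain ⟨rfl, hrest⟩ := hL
            cases a' with
            | nil =>
              simp at hrest
              refine Or.inl ⟨w, ⟨b, hrest.symm⟩, hwne, ?_⟩
              rw [PySem.Set.mem_add]
              right
              omega
            | cons z a'' =>
              exact Or.inr ⟨z :: a'', w, b, by simp [hrest], by simp, hwne, hsum⟩

-- ===== VERDICT (by name: the statement is the Claim_ definition above) =====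
theorem is_sum_of_consecutive_primes_spec : Claim_equal_is_sum_of_consecutive_primes := by
  intro n _
  unfold Spec_is_sum_of_consecutive_primes
  unfold is_sum_of_consecutive_primes is_sum_of_consecutive_primes_alt
  rw [Bool.eq_iff_iff]
  rw [pvOuterA_iff n _ (pvSieve_pos (n+1)), pvLoopB_iff]
  constructor
  · rintro ⟨a, w, b, hL, hw, hsum⟩
    cases a with
    | nil =>
      exact Or.inl ⟨w, ⟨b, by simpa using hL.symm⟩, hw, by
        simp [PySem.Set.mem_ofList]; omega⟩
    | cons x a' =>
      exact Or.inr ⟨x :: a', w, b, hL, by simp, hw, hsum⟩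
  · rintro (⟨w, ⟨b, hb⟩, hw, hmem⟩ | ⟨a, w, b, hL, _, hw, hsum⟩)
    · have : w.sum = n := by
        simp [PySem.Set.mem_ofList] at hmem; omega
      exact ⟨[], w, b, by simpa using hb.symm, hw, this⟩
    · exact ⟨a, w, b, hL, hw, hsum⟩
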